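-- pv_equiv track=rewrite | github.com/0x01h/counting-sundays | HW-1/daysinyear.py | days_in_year
-- ===== SOURCE A (Python) =====
-- def days_in_year(x):
--     z = 0
--     for y in range(0, x):
--         if (y % 4) == 0:
--             z += 366
--         else:
--             z += 365
--     return z
-- ===== SOURCE B (Python) =====
-- def days_in_year(x):
--     if x <= 0:
--         return 0
--     return 365 * x + (x + 3) // 4
-- ===== Notes on version B (the rewrite author's own statement) =====
-- stated objective: faster
-- what changed: replaced the per-year loop with a closed form: 365*x plus the count of multiples of 4 below x, computed as (x+3)//4
import Mathlib
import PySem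

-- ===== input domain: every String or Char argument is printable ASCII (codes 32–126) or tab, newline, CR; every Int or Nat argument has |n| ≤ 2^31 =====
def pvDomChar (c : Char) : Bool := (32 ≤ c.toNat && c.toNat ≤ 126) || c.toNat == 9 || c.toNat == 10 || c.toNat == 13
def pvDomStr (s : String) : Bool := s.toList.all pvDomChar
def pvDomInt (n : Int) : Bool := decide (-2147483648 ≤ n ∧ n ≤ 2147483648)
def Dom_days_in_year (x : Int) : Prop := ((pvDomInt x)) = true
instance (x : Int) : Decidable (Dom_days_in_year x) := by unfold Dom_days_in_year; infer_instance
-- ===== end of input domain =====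

-- B replaces A's per-year loop with a closed form (365*x + (x+3)//4); objective: faster (O(1) vs O(x)).

-- ===== PORT A =====
def days_in_year (x : Int) : Int :=
  (PySem.List.pyRange 0 x 1).foldl
    (fun z y => if PySem.Int.mod y 4 = 0 then z + 366 else z + 365) 0

-- ===== PORT B =====
def days_in_year_alt (x : Int) : Int :=
  if x ≤ 0 then 0 else 365 * x + PySem.Int.floordiv (x + 3) 4

-- ===== PRECONDITION & SPEC =====
def Spec_days_in_year (x : Int) (out : Int) : Prop := out = days_in_year_alt x
instance (x : Int) (out : Int) : Decidable (Spec_days_in_year x out) := by unfold Spec_days_in_year; infer_instance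

-- ===== CLAIM (what is proved, stated in full; the proofs are below) =====
def Claim_equal_days_in_year : Prop := ∀ (x : Int), Dom_days_in_year x → Spec_days_in_year x (days_in_year x)

-- ===== LEMMAS AND PROOFS =====

-- the fold from any accumulator shifts the accumulator out
theorem days_fold_shift (l : List Int) (z : Int) :
    l.foldl (fun z y => if PySem.Int.mod y 4 = 0 then z + 366 else z + 365) z
      = z + l.foldl (fun z y => if PySem.Int.mod y 4 = 0 then z + 366 else z + 365) 0 := by
  induction l generalizing z with
  | nil => simp
  | cons a t ih =>
    simp only [List.foldl_cons]
    rw [ih, ih (if PySem.Int.mod a 4 = 0 then 0 + 366 else 0 + 365)]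
    split <;> ring

theorem days_loop_closed (n : Nat) :
    days_in_year (n : Int) = 365 * (n : Int) + ((n : Int) + 3) / 4 := by
  induction n with
  | zero => simp [days_in_year, PySem.List.pyRange_one_eq_nil]
  | succ m ih =>
    unfold days_in_year at *
    rw [show ((m + 1 : Nat) : Int) = (m : Int) + 1 by push_cast; ring,
        PySem.List.pyRange_one_succ_right (by positivity),
        List.foldl_append]
    simp only [List.foldl_cons, List.foldl_nil]
    rw [days_fold_shift, ih]
    have hmod : PySem.Int.mod (m : Int) 4 = (m : Int) % 4 :=
      PySem.Int.mod_eq_emod_of_pos (by norm_num)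
    rw [hmod]
    split_ifs with h <;> omega

-- ===== VERDICT (by name: the statement is the Claim_ definition above) =====
theorem days_in_year_spec : Claim_equal_days_in_year := by
  intro x _
  unfold Spec_days_in_year days_in_year_alt
  by_cases hx : x ≤ 0
  · simp [hx, days_in_year, PySem.List.pyRange_one_eq_nil hx]
  · obtain ⟨n, rfl⟩ : ∃ n : Nat, x = (n : Int) := ⟨x.toNat, by omega⟩
    rw [if_neg hx, days_loop_closed n]
    have h4 : PySem.Int.floordiv ((n : Int) + 3) 4 = ((n : Int) + 3) / 4 :=
      PySem.Int.floordiv_eq_ediv_of_pos (by norm_num)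
    rw [h4]
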